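-- pv_equiv track=rewrite | github.com/diaoenmao/Research | src/util.py | gen_hidden_layers
-- ===== SOURCE A (Python) =====
-- import itertools
--
-- def gen_hidden_layers(max_num_nodes,init_size=None,step_size=None):
--     if (init_size is None):
--         init_size=[1]*len(max_num_nodes)
--     if (step_size is None):
--         step_size = [1]*len(max_num_nodes)
--     num_nodes = []
--     hidden_layers = []
--     for i in range(len(max_num_nodes)):
--         num_nodes.append(list(range(init_size[i],max_num_nodes[i]+1,step_size[i])))
--     while(len(num_nodes) != 0):
--         hidden_layers.extend(list(itertools.product(*num_nodes)))
--         del num_nodes[-1]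
--     return hidden_layers
-- ===== SOURCE B (Python) =====
-- def gen_hidden_layers(max_num_nodes, init_size=None, step_size=None):
--     n = len(max_num_nodes)
--     if init_size is None:
--         init_size = [1] * n
--     if step_size is None:
--         step_size = [1] * n
--     ranges = [list(range(init_size[i], max_num_nodes[i] + 1, step_size[i])) for i in range(n)]
--     if not ranges:
--         return []
--     prefix = [(x,) for x in ranges[0]]
--     blocks = [prefix]
--     for r in ranges[1:]:
--         prefix = [p + (y,) for p in prefix for y in r]
--         blocks.append(prefix)
--     out = []
--     for block in reversed(blocks):
--         out.extend(block)
--     return out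
-- ===== Notes on version B (the rewrite author's own statement) =====
-- stated objective: alternative
-- what changed: Replaces the repeated full itertools.product per prefix with one incremental frontier of partial tuples: each prefix-product block is built by extending the previous block with the next range, blocks are recorded and concatenated long-to-short.
import Mathlib
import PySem

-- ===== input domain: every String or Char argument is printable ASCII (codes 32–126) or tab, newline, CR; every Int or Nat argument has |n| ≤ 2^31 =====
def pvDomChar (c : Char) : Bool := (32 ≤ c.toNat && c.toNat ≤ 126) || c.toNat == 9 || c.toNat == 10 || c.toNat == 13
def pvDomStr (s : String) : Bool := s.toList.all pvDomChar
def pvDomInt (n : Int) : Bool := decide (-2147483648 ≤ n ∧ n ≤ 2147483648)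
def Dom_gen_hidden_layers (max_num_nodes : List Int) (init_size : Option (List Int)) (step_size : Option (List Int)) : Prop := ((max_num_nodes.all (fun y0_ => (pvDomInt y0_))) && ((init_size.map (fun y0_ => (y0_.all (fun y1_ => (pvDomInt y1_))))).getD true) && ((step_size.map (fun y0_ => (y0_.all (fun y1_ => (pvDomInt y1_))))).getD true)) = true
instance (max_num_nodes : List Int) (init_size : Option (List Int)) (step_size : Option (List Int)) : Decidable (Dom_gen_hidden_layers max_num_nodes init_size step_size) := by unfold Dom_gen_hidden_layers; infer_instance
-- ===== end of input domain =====

-- B builds each prefix-product block by extending the previous block instead of recomputing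
-- itertools.product from scratch for every prefix length (objective: alternative decomposition).

-- ===== PORT A =====
-- port of list(itertools.product(*num_nodes)): tuples in lexicographic order
def pvProdA (nn : List (List Int)) : List (List Int) :=
  nn.foldr (fun l acc => l.flatMap (fun x => acc.map (fun t => x :: t))) [[]]

-- port of A's while loop: extend by the product of the current lists, then delete the last list
def pvALoop (nn : List (List Int)) (acc : List (List Int)) : List (List Int) :=
  if _h : nn = [] then acc
  else pvALoop nn.dropLast (acc ++ pvProdA nn)
termination_by nn.length
decreasing_by
  have : nn.length ≠ 0 := fun hl => _h (List.eq_nil_of_length_eq_zero hl)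
  simp [List.length_dropLast]; omega

def gen_hidden_layers (max_num_nodes : List Int) (init_size : Option (List Int)) (step_size : Option (List Int)) : List (List Int) :=
  let init := init_size.getD (List.replicate max_num_nodes.length 1)
  let step := step_size.getD (List.replicate max_num_nodes.length 1)
  let num_nodes := (PySem.List.pyRange 0 max_num_nodes.length 1).foldl
    (fun acc i => acc ++ [PySem.List.pyRange (PySem.List.pyGetD init i 0)
                          (PySem.List.pyGetD max_num_nodes i 0 + 1)
                          (PySem.List.pyGetD step i 0)]) []
  pvALoop num_nodes []

-- ===== PORT B =====
-- one extension step: [p + (y,) for p in prefix for y in r]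
def pvBExt (ps : List (List Int)) (r : List Int) : List (List Int) :=
  ps.flatMap (fun p => r.map (fun y => p ++ [y]))

-- port of B's for-loop over ranges[1:], threading (prefix, blocks)
def pvBLoop : List (List Int) → List (List Int) → List (List (List Int)) → List (List (List Int))
  | [], _, blocks => blocks
  | r :: rest, pfx, blocks => pvBLoop rest (pvBExt pfx r) (blocks ++ [pvBExt pfx r])

def gen_hidden_layers_alt (max_num_nodes : List Int) (init_size : Option (List Int)) (step_size : Option (List Int)) : List (List Int) :=
  let init := init_size.getD (List.replicate max_num_nodes.length 1)
  let step := step_size.getD (List.replicate max_num_nodes.length 1)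
  let ranges := (PySem.List.pyRange 0 max_num_nodes.length 1).map
    (fun i => PySem.List.pyRange (PySem.List.pyGetD init i 0)
              (PySem.List.pyGetD max_num_nodes i 0 + 1)
              (PySem.List.pyGetD step i 0))
  match ranges with
  | [] => []
  | r0 :: rest =>
    let pfx0 := r0.map (fun x => [x])
    let blocks := pvBLoop rest pfx0 [pfx0]
    blocks.reverse.flatMap id

-- ===== PRECONDITION & SPEC =====
-- Pre_ excludes exactly the inputs where Python A raises: a provided init_size or step_size
-- shorter than max_num_nodes (IndexError) or a used step of 0 (ValueError from range).
def Pre_gen_hidden_layers (max_num_nodes : List Int) (init_size : Option (List Int)) (step_size : Option (List Int)) : Prop :=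
  max_num_nodes.length ≤ (init_size.getD (List.replicate max_num_nodes.length 1)).length ∧
  max_num_nodes.length ≤ (step_size.getD (List.replicate max_num_nodes.length 1)).length ∧
  ∀ x ∈ (step_size.getD (List.replicate max_num_nodes.length 1)).take max_num_nodes.length, x ≠ 0
instance (max_num_nodes : List Int) (init_size : Option (List Int)) (step_size : Option (List Int)) : Decidable (Pre_gen_hidden_layers max_num_nodes init_size step_size) := by
  unfold Pre_gen_hidden_layers; infer_instance

def pvWitness_gen_hidden_layers : List Int × Option (List Int) × Option (List Int) :=
  ([3, 2], some [1, 1], some [1, 1])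

def Spec_gen_hidden_layers (max_num_nodes : List Int) (init_size : Option (List Int)) (step_size : Option (List Int)) (out : List (List Int)) : Prop := out = gen_hidden_layers_alt max_num_nodes init_size step_size
instance (max_num_nodes : List Int) (init_size : Option (List Int)) (step_size : Option (List Int)) (out : List (List Int)) : Decidable (Spec_gen_hidden_layers max_num_nodes init_size step_size out) := by unfold Spec_gen_hidden_layers; infer_instance

-- ===== CLAIM (what is proved, stated in full; the proofs are below) =====
def Claim_equal_gen_hidden_layers : Prop := ∀ (max_num_nodes : List Int) (init_size : Option (List Int)) (step_size : Option (List Int)), Dom_gen_hidden_layers max_num_nodes init_size step_size → Pre_gen_hidden_layers max_num_nodes init_size step_size → Spec_gen_hidden_layers max_num_nodes init_size step_size (gen_hidden_layers max_num_nodes init_size step_size)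

-- ===== LEMMAS AND PROOFS =====

theorem pvMapSingleton (r : List Int) :
    List.flatMap (fun x => [[x]]) r = r.map (fun x => ([x] : List Int)) := by
  induction r <;> simp [*]

theorem pvALoop_acc : ∀ (nn : List (List Int)) (acc : List (List Int)),
    pvALoop nn acc = acc ++ pvALoop nn []
  | nn, acc => by
    conv_lhs => rw [pvALoop]
    conv_rhs => rw [pvALoop]
    by_cases h : nn = []
    · simp [h]
    · rw [dif_neg h, dif_neg h,
          pvALoop_acc nn.dropLast (acc ++ pvProdA nn),
          pvALoop_acc nn.dropLast ([] ++ pvProdA nn)]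
      simp
termination_by nn _ => nn.length
decreasing_by
  all_goals
    have : nn.length ≠ 0 := fun hl => h (List.eq_nil_of_length_eq_zero hl)
    simp [List.length_dropLast]; omega

theorem pvALoop_snoc (ls : List (List Int)) (r : List Int) :
    pvALoop (ls ++ [r]) [] = pvProdA (ls ++ [r]) ++ pvALoop ls [] := by
  rw [pvALoop]
  split
  · rename_i h; simp at h
  · rw [List.dropLast_concat, pvALoop_acc]
    simp

theorem pvProdA_snoc (ls : List (List Int)) (r : List Int) :
    pvProdA (ls ++ [r]) = pvBExt (pvProdA ls) r := by
  induction ls with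
  | nil =>
    simp only [List.nil_append, pvProdA, List.foldr_cons, List.foldr_nil, pvBExt]
    simp [pvMapSingleton]
  | cons l ls ih =>
    simp only [List.cons_append, pvProdA, List.foldr_cons] at *
    rw [ih]
    simp [pvBExt, List.flatMap_assoc, List.flatMap_map, List.map_flatMap, List.map_map, Function.comp_def]

def pvBlocksFor : List (List Int) → List (List Int) → List (List (List Int))
  | [], _ => []
  | r :: rest, pfx => pvBExt pfx r :: pvBlocksFor rest (pvBExt pfx r)

theorem pvBLoop_blocks : ∀ (rest : List (List Int)) (pfx : List (List Int))
    (blocks : List (List (List Int))),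
    pvBLoop rest pfx blocks = blocks ++ pvBlocksFor rest pfx := by
  intro rest
  induction rest with
  | nil => intro pfx blocks; simp [pvBLoop, pvBlocksFor]
  | cons r rest ih =>
    intro pfx blocks
    simp [pvBLoop, pvBlocksFor, ih]

theorem pvMain : ∀ (rest ls : List (List Int)), ls ≠ [] →
    pvALoop (ls ++ rest) [] =
      (pvBlocksFor rest (pvProdA ls)).reverse.flatMap id ++ pvALoop ls [] := by
  intro rest
  induction rest with
  | nil => intro ls _; simp [pvBlocksFor]
  | cons r rest ih =>
    intro ls hls
    have h1 : ls ++ r :: rest = (ls ++ [r]) ++ rest := by simp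
    rw [h1, ih (ls ++ [r]) (by simp), pvALoop_snoc]
    rw [pvBlocksFor, ← pvProdA_snoc]
    simp

theorem pvProdA_singleton (r : List Int) : pvProdA [r] = r.map (fun x => [x]) := by
  simp only [pvProdA, List.foldr_cons, List.foldr_nil]
  simp [pvMapSingleton]

theorem pvALoop_singleton (r : List Int) : pvALoop [r] [] = pvProdA [r] := by
  rw [pvALoop]
  split
  · rename_i h; simp at h
  · rw [show ([r] : List (List Int)).dropLast = [] from rfl, pvALoop]
    simp

theorem pvEq (nn : List (List Int)) :
    pvALoop nn [] =
      (match nn with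
       | [] => []
       | r0 :: rest =>
         (pvBLoop rest (r0.map (fun x => [x])) [r0.map (fun x => [x])]).reverse.flatMap id) := by
  cases nn with
  | nil => rw [pvALoop]; simp
  | cons r0 rest =>
    simp only
    rw [pvBLoop_blocks]
    have h1 : r0 :: rest = [r0] ++ rest := by simp
    rw [h1, pvMain rest [r0] (by simp)]
    simp [pvALoop_singleton, pvProdA_singleton]

-- ===== VERDICT (by name: the statement is the Claim_ definition above) =====
theorem gen_hidden_layers_spec : Claim_equal_gen_hidden_layers := by
  intro m is ss _ _
  unfold Spec_gen_hidden_layers gen_hidden_layers gen_hidden_layers_alt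
  dsimp only
  rw [PySem.List.foldl_append_singleton_eq_map]
  simp only [List.nil_append]
  exact pvEq _
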